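-- pv_equiv track=rewrite | github.com/the-atlas-protocol/rexfinhub | webapp/routers/global_search.py | _search_pages
-- ===== SOURCE A (Python) =====
-- _SITE_PAGES = [
--     {"name": "Market Intelligence - REX View", "url": "/market/rex", "keywords": "market rex view intelligence products suite"},
--     {"name": "Market Intelligence - Category", "url": "/market/category", "keywords": "market category leveraged inverse income crypto"},
--     {"name": "Market Intelligence - Issuer Analysis", "url": "/market/issuer", "keywords": "market issuer analysis share"},
--     {"name": "Market Intelligence - Underlier", "url": "/market/underlier", "keywords": "market underlier index underlying exposure"},
--     {"name": "ETP Launch Calendar", "url": "/calendar/", "keywords": "calendar launches inception effective date etp tracker"},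
--     {"name": "Market Intelligence - Calendar", "url": "/market/calendar", "keywords": "market calendar launches inception"},
--     {"name": "Market Intelligence - Compare", "url": "/market/compare", "keywords": "market compare products head to head"},
--     {"name": "Trust Dashboard", "url": "/dashboard", "keywords": "dashboard trust filings overview status"},
--     {"name": "Trust Universe", "url": "/universe/", "keywords": "universe trusts all issuers browse"},
--     {"name": "Fund Lookup", "url": "/funds/", "keywords": "fund lookup search name ticker series"},
--     {"name": "Filing Explorer", "url": "/filings/", "keywords": "filing explorer accession sec edgar browse"},
--     {"name": "Filing Screener", "url": "/screener/", "keywords": "screener filing landscape ipo pre-ipo"},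
--     {"name": "3x Analysis", "url": "/screener/3x-analysis", "keywords": "screener 3x triple leveraged analysis"},
--     {"name": "Candidate Evaluator", "url": "/screener/evaluate", "keywords": "screener candidate evaluate score"},
--     {"name": "13F Institutional Holders", "url": "/holdings/", "keywords": "holdings 13f institutional holders ownership"},
--     {"name": "Institutional Crossover", "url": "/holdings/crossover", "keywords": "holdings crossover institutional overlap"},
--     {"name": "Analytics", "url": "/analytics", "keywords": "analytics trends data"},
--     {"name": "Data & API", "url": "/downloads/", "keywords": "exports downloads csv data api screener"},
-- ]
--
-- def _search_pages(q: str, limit: int = 5) -> list[dict]: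
--     """Match query against site page names and keywords."""
--     ql = q.lower()
--     results = []
--     for page in _SITE_PAGES:
--         name_l = page["name"].lower()
--         kw_l = page["keywords"]
--         # Exact substring in name gets priority
--         if ql in name_l:
--             results.append({"name": page["name"], "url": page["url"], "score": 2})
--         elif ql in kw_l:
--             results.append({"name": page["name"], "url": page["url"], "score": 1})
--     results.sort(key=lambda x: -x["score"])
--     return [{"name": r["name"], "url": r["url"]} for r in results[:limit]]
-- ===== SOURCE B (Python) =====
-- _SITE_PAGES = [
--     {"name": "Market Intelligence - REX View", "url": "/market/rex", "keywords": "market rex view intelligence products suite"},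
--     {"name": "Market Intelligence - Category", "url": "/market/category", "keywords": "market category leveraged inverse income crypto"},
--     {"name": "Market Intelligence - Issuer Analysis", "url": "/market/issuer", "keywords": "market issuer analysis share"},
--     {"name": "Market Intelligence - Underlier", "url": "/market/underlier", "keywords": "market underlier index underlying exposure"},
--     {"name": "ETP Launch Calendar", "url": "/calendar/", "keywords": "calendar launches inception effective date etp tracker"},
--     {"name": "Market Intelligence - Calendar", "url": "/market/calendar", "keywords": "market calendar launches inception"},
--     {"name": "Market Intelligence - Compare", "url": "/market/compare", "keywords": "market compare products head to head"},
--     {"name": "Trust Dashboard", "url": "/dashboard", "keywords": "dashboard trust filings overview status"},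
--     {"name": "Trust Universe", "url": "/universe/", "keywords": "universe trusts all issuers browse"},
--     {"name": "Fund Lookup", "url": "/funds/", "keywords": "fund lookup search name ticker series"},
--     {"name": "Filing Explorer", "url": "/filings/", "keywords": "filing explorer accession sec edgar browse"},
--     {"name": "Filing Screener", "url": "/screener/", "keywords": "screener filing landscape ipo pre-ipo"},
--     {"name": "3x Analysis", "url": "/screener/3x-analysis", "keywords": "screener 3x triple leveraged analysis"},
--     {"name": "Candidate Evaluator", "url": "/screener/evaluate", "keywords": "screener candidate evaluate score"},
--     {"name": "13F Institutional Holders", "url": "/holdings/", "keywords": "holdings 13f institutional holders ownership"},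
--     {"name": "Institutional Crossover", "url": "/holdings/crossover", "keywords": "holdings crossover institutional overlap"},
--     {"name": "Analytics", "url": "/analytics", "keywords": "analytics trends data"},
--     {"name": "Data & API", "url": "/downloads/", "keywords": "exports downloads csv data api screener"},
-- ]
--
-- def _search_pages(q: str, limit: int = 5) -> list[dict]:
--     """Match query against site page names and keywords, name hits first."""
--     ql = q.lower()
--     name_hits = []
--     kw_hits = []
--     for page in _SITE_PAGES:
--         hit = {"name": page["name"], "url": page["url"]}
--         if ql in page["name"].lower():
--             name_hits.append(hit)
--         elif ql in page["keywords"]: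
--             kw_hits.append(hit)
--     return (name_hits + kw_hits)[:limit]
-- ===== Notes on version B (the rewrite author's own statement) =====
-- stated objective: simpler
-- what changed: B partitions matches into a name-hit bucket and a keyword-hit bucket during the single scan and returns their concatenation sliced, eliminating A's score field, its sort pass and its final rebuild comprehension (stable sort by -score is exactly priority-then-insertion order).
import Mathlib
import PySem

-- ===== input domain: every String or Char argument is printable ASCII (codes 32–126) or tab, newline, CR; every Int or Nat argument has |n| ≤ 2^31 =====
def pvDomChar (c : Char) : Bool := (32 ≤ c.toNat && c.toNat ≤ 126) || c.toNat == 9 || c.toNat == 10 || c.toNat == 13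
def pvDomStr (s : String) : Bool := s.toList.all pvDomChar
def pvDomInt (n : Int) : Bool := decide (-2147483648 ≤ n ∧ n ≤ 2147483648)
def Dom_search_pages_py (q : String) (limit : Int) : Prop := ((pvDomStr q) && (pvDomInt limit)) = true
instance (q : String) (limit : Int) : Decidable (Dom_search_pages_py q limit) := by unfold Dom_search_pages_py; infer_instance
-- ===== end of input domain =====

-- B replaces A's score/sort/rebuild pipeline with two buckets filled in one scan and concatenated (simpler; same result by sort stability).


-- the module constant _SITE_PAGES: (name, url, keywords)
def sitePages : List (String × String × String) :=
  [ ("Market Intelligence - REX View", "/market/rex", "market rex view intelligence products suite"),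
    ("Market Intelligence - Category", "/market/category", "market category leveraged inverse income crypto"),
    ("Market Intelligence - Issuer Analysis", "/market/issuer", "market issuer analysis share"),
    ("Market Intelligence - Underlier", "/market/underlier", "market underlier index underlying exposure"),
    ("ETP Launch Calendar", "/calendar/", "calendar launches inception effective date etp tracker"),
    ("Market Intelligence - Calendar", "/market/calendar", "market calendar launches inception"),
    ("Market Intelligence - Compare", "/market/compare", "market compare products head to head"),
    ("Trust Dashboard", "/dashboard", "dashboard trust filings overview status"),
    ("Trust Universe", "/universe/", "universe trusts all issuers browse"),
    ("Fund Lookup", "/funds/", "fund lookup search name ticker series"),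
    ("Filing Explorer", "/filings/", "filing explorer accession sec edgar browse"),
    ("Filing Screener", "/screener/", "screener filing landscape ipo pre-ipo"),
    ("3x Analysis", "/screener/3x-analysis", "screener 3x triple leveraged analysis"),
    ("Candidate Evaluator", "/screener/evaluate", "screener candidate evaluate score"),
    ("13F Institutional Holders", "/holdings/", "holdings 13f institutional holders ownership"),
    ("Institutional Crossover", "/holdings/crossover", "holdings crossover institutional overlap"),
    ("Analytics", "/analytics", "analytics trends data"),
    ("Data & API", "/downloads/", "exports downloads csv data api screener") ]

-- ===== PORT A =====
-- A's loop body: results entries are (name, url, score) triples (Python's intermediate dicts)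
def aStep (ql : String) (acc : List (String × String × Int)) (page : String × String × String) :
    List (String × String × Int) :=
  let name_l := PySem.Str.lower page.1
  let kw_l := page.2.2
  if PySem.Str.isIn ql name_l then acc ++ [(page.1, page.2.1, (2 : Int))]
  else if PySem.Str.isIn ql kw_l then acc ++ [(page.1, page.2.1, (1 : Int))]
  else acc

def search_pages_py (q : String) (limit : Int) : List (List (String × String)) :=
  let ql := PySem.Str.lower q
  let results := sitePages.foldl (aStep ql) []
  let sortedResults := PySem.List.sorted results (fun x => -x.2.2)
  (PySem.List.slice sortedResults none (some limit)).map
    (fun r => [("name", r.1), ("url", r.2.1)])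

-- ===== PORT B =====
-- B's loop body: append the hit dict to the name bucket or the keyword bucket
def bStep (ql : String)
    (acc : List (List (String × String)) × List (List (String × String)))
    (page : String × String × String) :
    List (List (String × String)) × List (List (String × String)) :=
  let hit := [("name", page.1), ("url", page.2.1)]
  if PySem.Str.isIn ql (PySem.Str.lower page.1) then (acc.1 ++ [hit], acc.2)
  else if PySem.Str.isIn ql page.2.2 then (acc.1, acc.2 ++ [hit])
  else acc

def search_pages_py_alt (q : String) (limit : Int) : List (List (String × String)) :=
  let ql := PySem.Str.lower q
  let buckets := sitePages.foldl (bStep ql) ([], [])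
  PySem.List.slice (buckets.1 ++ buckets.2) none (some limit)

-- ===== PRECONDITION & SPEC =====
def Spec_search_pages_py (q : String) (limit : Int) (out : List (List (String × String))) : Prop := out = search_pages_py_alt q limit
instance (q : String) (limit : Int) (out : List (List (String × String))) : Decidable (Spec_search_pages_py q limit out) := by unfold Spec_search_pages_py; infer_instance

-- ===== CLAIM (what is proved, stated in full; the proofs are below) =====
def Claim_equal_search_pages_py : Prop := ∀ (q : String) (limit : Int), Dom_search_pages_py q limit → Spec_search_pages_py q limit (search_pages_py q limit)

-- ===== LEMMAS AND PROOFS =====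

-- inserting x whose 'before' test fails on every element of a prefix skips that prefix
theorem insertBy_append_left {α : Type} (before : α → α → Bool) (x : α) (l1 l2 : List α)
    (h : ∀ y ∈ l1, before x y = false) :
    PySem.List.insertBy before x (l1 ++ l2) = l1 ++ PySem.List.insertBy before x l2 := by
  induction l1 with
  | nil => simp
  | cons a t ih =>
    simp only [List.cons_append, PySem.List.insertBy, h a (by simp)]
    simp [ih (fun y hy => h y (by simp [hy]))]

-- inserting x that sorts before everything prepends
theorem insertBy_of_forall_before {α : Type} (before : α → α → Bool) (x : α) (ys : List α)
    (h : ∀ y ∈ ys, before x y = true) :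
    PySem.List.insertBy before x ys = x :: ys := by
  cases ys with
  | nil => rfl
  | cons a t => simp [PySem.List.insertBy, h a (by simp)]

-- the insertion-sort fold by -score over a {1,2}-scored list keeps "twos then ones", each in order
theorem foldl_insertBy_buckets (xs : List (String × String × Int))
    (A2 A1 : List (String × String × Int))
    (hxs : ∀ r ∈ xs, r.2.2 = 2 ∨ r.2.2 = 1)
    (h2 : ∀ r ∈ A2, r.2.2 = 2) (h1 : ∀ r ∈ A1, r.2.2 = 1) :
    xs.foldl (fun acc x =>
        PySem.List.insertBy (fun a b => decide ((fun r : String × String × Int => -r.2.2) a < (fun r : String × String × Int => -r.2.2) b)) x acc)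
      (A2 ++ A1)
    = (A2 ++ (xs.filter (fun r => r.2.2 == 2))) ++ (A1 ++ (xs.filter (fun r => r.2.2 == 1))) := by
  induction xs generalizing A2 A1 with
  | nil => simp
  | cons x t ih =>
    have ht : ∀ r ∈ t, r.2.2 = 2 ∨ r.2.2 = 1 := fun r hr => hxs r (by simp [hr])
    rcases hxs x (by simp) with hx | hx
    · have hstep : PySem.List.insertBy (fun a b => decide (-(a.2.2) < -(b.2.2))) x (A2 ++ A1)
          = (A2 ++ [x]) ++ A1 := by
        rw [insertBy_append_left _ _ _ _ (fun y hy => by simp [hx, h2 y hy]),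
            insertBy_of_forall_before _ _ _ (fun y hy => by simp [hx, h1 y hy])]
        simp
      simp only [List.foldl_cons, hstep]
      rw [ih (A2 ++ [x]) A1 ht
            (fun r hr => by rcases List.mem_append.1 hr with h | h
                            · exact h2 r h
                            · simp at h; simp [h, hx]) h1]
      simp [hx]
    · have hstep : PySem.List.insertBy (fun a b => decide (-(a.2.2) < -(b.2.2))) x (A2 ++ A1)
          = A2 ++ (A1 ++ [x]) := by
        rw [PySem.List.insertBy_of_forall_not_before _ _ _
              (fun y hy => by rcases List.mem_append.1 hy with h | h
                              · simp [hx, h2 y h]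
                              · simp [hx, h1 y h])]
        simp
      simp only [List.foldl_cons, hstep]
      rw [ih A2 (A1 ++ [x]) ht h2
            (fun r hr => by rcases List.mem_append.1 hr with h | h
                            · exact h1 r h
                            · simp at h; simp [h, hx])]
      simp [hx]

theorem sorted_buckets (xs : List (String × String × Int))
    (hxs : ∀ r ∈ xs, r.2.2 = 2 ∨ r.2.2 = 1) :
    PySem.List.sorted xs (fun r => -r.2.2)
    = (xs.filter (fun r => r.2.2 == 2)) ++ (xs.filter (fun r => r.2.2 == 1)) := by
  rw [PySem.List.sorted_eq_foldl_insertBy]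
  have := foldl_insertBy_buckets xs [] [] hxs (by simp) (by simp)
  simpa using this

-- slice [:b] commutes with map (take/drop do, and map preserves length)
theorem map_slice_to {α β : Type} (f : α → β) (xs : List α) (b : Int) :
    (PySem.List.slice xs none (some b)).map f = PySem.List.slice (xs.map f) none (some b) := by
  by_cases hb : 0 ≤ b
  · rw [PySem.List.slice_to xs hb, PySem.List.slice_to (xs.map f) hb, List.map_take]
  · obtain ⟨k, hk, rfl⟩ : ∃ k : Nat, 0 < k ∧ b = -(k : Int) :=
      ⟨(-b).toNat, by omega, by omega⟩
    rw [PySem.List.slice_to_neg_natCast xs k hk, PySem.List.slice_to_neg_natCast (xs.map f) k hk,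
        List.map_take, List.length_map]

-- B's pair-accumulator fold, characterised
theorem foldl_bStep (ql : String) (ps : List (String × String × String))
    (a b : List (List (String × String))) :
    ps.foldl (bStep ql) (a, b)
    = (a ++ ((ps.filter (fun p => PySem.Str.isIn ql (PySem.Str.lower p.1))).map
              (fun p => [("name", p.1), ("url", p.2.1)])),
       b ++ ((ps.filter (fun p => !PySem.Str.isIn ql (PySem.Str.lower p.1)
                && PySem.Str.isIn ql p.2.2)).map
              (fun p => [("name", p.1), ("url", p.2.1)]))) := by
  induction ps generalizing a b with
  | nil => simp
  | cons p t ih =>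
    simp only [List.foldl_cons, List.filter_cons]
    by_cases h2 : PySem.Chars.isIn ql.toList (PySem.Chars.lower p.1.toList) = true
    · rw [show bStep ql (a, b) p = (a ++ [[("name", p.1), ("url", p.2.1)]], b) from by
        simp [bStep, h2]]
      rw [ih]
      simp [h2]
    · by_cases h1 : PySem.Chars.isIn ql.toList p.2.2.toList = true
      · rw [show bStep ql (a, b) p = (a, b ++ [[("name", p.1), ("url", p.2.1)]]) from by
          simp [bStep, h2, h1]]
        rw [ih]
        simp [h2, h1]
      · rw [show bStep ql (a, b) p = (a, b) from by simp [bStep, h2, h1]]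
        rw [ih]
        simp [h2, h1]

-- A's append-fold, characterised as a flatMap
theorem foldl_aStep (ql : String) (ps : List (String × String × String)) :
    ps.foldl (aStep ql) []
    = ps.flatMap (fun page =>
        if PySem.Str.isIn ql (PySem.Str.lower page.1) then [(page.1, page.2.1, (2 : Int))]
        else if PySem.Str.isIn ql page.2.2 then [(page.1, page.2.1, (1 : Int))]
        else []) := by
  have : aStep ql
    = (fun acc page => acc ++
        (if PySem.Str.isIn ql (PySem.Str.lower page.1) then [(page.1, page.2.1, (2 : Int))]
         else if PySem.Str.isIn ql page.2.2 then [(page.1, page.2.1, (1 : Int))]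
         else [])) := by
    funext acc page
    simp only [aStep]
    split_ifs <;> simp
  rw [this, PySem.List.foldl_append_eq_flatMap]
  simp

theorem filter_flatMap_two (ql : String) (ps : List (String × String × String)) :
    ((ps.flatMap (fun page =>
        if PySem.Str.isIn ql (PySem.Str.lower page.1) then [(page.1, page.2.1, (2 : Int))]
        else if PySem.Str.isIn ql page.2.2 then [(page.1, page.2.1, (1 : Int))]
        else [])).filter (fun r => r.2.2 == 2))
    = (ps.filter (fun p => PySem.Str.isIn ql (PySem.Str.lower p.1))).map
        (fun p => (p.1, p.2.1, (2 : Int))) := by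
  induction ps with
  | nil => rfl
  | cons p t ih =>
    simp only [List.flatMap_cons, List.filter_append, List.filter_cons, ih]
    split_ifs <;> simp_all

theorem filter_flatMap_one (ql : String) (ps : List (String × String × String)) :
    ((ps.flatMap (fun page =>
        if PySem.Str.isIn ql (PySem.Str.lower page.1) then [(page.1, page.2.1, (2 : Int))]
        else if PySem.Str.isIn ql page.2.2 then [(page.1, page.2.1, (1 : Int))]
        else [])).filter (fun r => r.2.2 == 1))
    = (ps.filter (fun p => !PySem.Str.isIn ql (PySem.Str.lower p.1)
          && PySem.Str.isIn ql p.2.2)).map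
        (fun p => (p.1, p.2.1, (1 : Int))) := by
  induction ps with
  | nil => rfl
  | cons p t ih =>
    simp only [List.flatMap_cons, List.filter_append, List.filter_cons, ih]
    split_ifs <;> simp_all

theorem flatMap_scores (ql : String) (ps : List (String × String × String)) :
    ∀ r ∈ ps.flatMap (fun page =>
        if PySem.Str.isIn ql (PySem.Str.lower page.1) then [(page.1, page.2.1, (2 : Int))]
        else if PySem.Str.isIn ql page.2.2 then [(page.1, page.2.1, (1 : Int))]
        else []), r.2.2 = 2 ∨ r.2.2 = 1 := by
  intro r hr
  rcases List.mem_flatMap.1 hr with ⟨p, _, hp⟩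
  revert hp
  split_ifs <;> simp_all

-- ===== VERDICT (by name: the statement is the Claim_ definition above) =====
theorem search_pages_py_spec : Claim_equal_search_pages_py := by
  intro q limit _
  unfold Spec_search_pages_py search_pages_py search_pages_py_alt
  simp only []
  rw [foldl_aStep (PySem.Str.lower q) sitePages,
      sorted_buckets _ (flatMap_scores (PySem.Str.lower q) sitePages),
      filter_flatMap_two (PySem.Str.lower q) sitePages,
      filter_flatMap_one (PySem.Str.lower q) sitePages,
      map_slice_to, foldl_bStep (PySem.Str.lower q) sitePages [] []]
  simp [List.map_map, Function.comp_def]
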